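-- pv_equiv track=rewrite | github.com/GioZulber/uni-python | explicación-python/ejercicios/ejercicio-3.py | divisibleOnce
-- ===== SOURCE A (Python) =====
-- def digitsArePair(num):
--     countDigits = 0
--     while num > 0:
--         num = num // 10
--         countDigits = countDigits + 1
--
--     if countDigits % 2 == 0:
--         return True
--     else:
--         return False
--
-- def divisibleOnce(num):
--     if digitsArePair(num):
--         fTerm = 0
--         sTerm = 0
--         index = 1
--         while num > 0:
--             digit = num % 10
--             num = num // 10
--             if index % 2 == 0:
--                 sTerm = sTerm + digit
--             else:
--                 fTerm = fTerm + digit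
--
--             index = index + 1
--
--         if fTerm == sTerm:
--             return True
--         else:
--             return False
-- ===== SOURCE B (Python) =====
-- def divisibleOnce(num):
--     digits = []
--     while num > 0:
--         digits.append(num % 10)
--         num //= 10
--     if len(digits) % 2 == 0:
--         return sum(digits[0::2]) == sum(digits[1::2])
-- ===== Notes on version B (the rewrite author's own statement) =====
-- stated objective: simpler
-- what changed: B collects the digits once into a list and compares two step-2 slice sums, replacing A's separate digit-counting pass plus running-sum loop with index-parity accumulators.
import Mathlib
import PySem

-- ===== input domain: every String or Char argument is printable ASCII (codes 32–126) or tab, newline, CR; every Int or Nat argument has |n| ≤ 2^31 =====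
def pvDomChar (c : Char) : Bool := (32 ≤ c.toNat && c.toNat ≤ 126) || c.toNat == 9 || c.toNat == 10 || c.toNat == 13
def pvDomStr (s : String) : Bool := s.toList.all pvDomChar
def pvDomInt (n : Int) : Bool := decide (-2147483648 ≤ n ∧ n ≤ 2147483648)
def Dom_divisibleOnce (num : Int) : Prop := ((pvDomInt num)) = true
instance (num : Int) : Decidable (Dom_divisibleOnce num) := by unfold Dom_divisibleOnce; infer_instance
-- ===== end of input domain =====

-- B collects the digits once into a list and compares two step-2 slice sums, replacing
-- A's separate digit-counting pass plus running-sum loop with parity accumulators (objective: simpler).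

-- termination helper for the digit loops (num // 10 shrinks while num > 0)
theorem pv_fdiv10_lt (n : Int) (h : 0 < n) : (PySem.Int.floordiv n 10).toNat < n.toNat := by
  rw [PySem.Int.floordiv_eq_ediv_of_pos (by omega : (0:Int) < 10)]
  omega

-- ===== PORT A =====
-- while num > 0: num //= 10; countDigits += 1
def aCount (num countDigits : Int) : Int :=
  if _h : num > 0 then aCount (PySem.Int.floordiv num 10) (countDigits + 1) else countDigits
termination_by num.toNat
decreasing_by exact pv_fdiv10_lt num _h

def digitsArePair (num : Int) : Bool :=
  if PySem.Int.mod (aCount num 0) 2 == 0 then true else false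

-- while num > 0: digit = num % 10; num //= 10; (index even → sTerm += digit, else fTerm += digit); index += 1
def aLoop (num fTerm sTerm index : Int) : Int × Int :=
  if _h : num > 0 then
    let digit := PySem.Int.mod num 10
    if PySem.Int.mod index 2 == 0 then
      aLoop (PySem.Int.floordiv num 10) fTerm (sTerm + digit) (index + 1)
    else
      aLoop (PySem.Int.floordiv num 10) (fTerm + digit) sTerm (index + 1)
  else (fTerm, sTerm)
termination_by num.toNat
decreasing_by all_goals exact pv_fdiv10_lt num _h

def divisibleOnce (num : Int) : Option Bool :=
  if digitsArePair num then
    let p := aLoop num 0 0 1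
    some (if p.1 == p.2 then true else false)
  else none

-- ===== PORT B =====
-- while num > 0: digits.append(num % 10); num //= 10
def bDigits (num : Int) : List Int :=
  if _h : num > 0 then PySem.Int.mod num 10 :: bDigits (PySem.Int.floordiv num 10) else []
termination_by num.toNat
decreasing_by exact pv_fdiv10_lt num _h

-- hand port of the step-2 slice xs[0::2] (exact: the elements at indices 0, 2, 4, …);
-- xs[1::2] is then everyOther xs.tail
def everyOther : List Int → List Int
  | [] => []
  | [x] => [x]
  | x :: _ :: rest => x :: everyOther rest

def divisibleOnce_alt (num : Int) : Option Bool :=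
  let ds := bDigits num
  if PySem.Int.mod (PySem.List.len ds) 2 == 0 then
    some ((everyOther ds).sum == (everyOther ds.tail).sum)
  else none

-- ===== PRECONDITION & SPEC =====
def Spec_divisibleOnce (num : Int) (out : Option Bool) : Prop := out = divisibleOnce_alt num
instance (num : Int) (out : Option Bool) : Decidable (Spec_divisibleOnce num out) := by unfold Spec_divisibleOnce; infer_instance

-- ===== CLAIM (what is proved, stated in full; the proofs are below) =====
def Claim_equal_divisibleOnce : Prop := ∀ (num : Int), Dom_divisibleOnce num → Spec_divisibleOnce num (divisibleOnce num)

-- ===== LEMMAS AND PROOFS =====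

theorem everyOther_cons (x : Int) (xs : List Int) :
    everyOther (x :: xs) = x :: everyOther xs.tail := by
  cases xs <;> simp [everyOther]

theorem aCount_eq (num : Int) : ∀ c : Int, aCount num c = c + ((bDigits num).length : Int) := by
  induction num using bDigits.induct with
  | case1 n h ih =>
    intro c
    rw [aCount, bDigits]
    simp only [dif_pos h]
    rw [ih]
    simp only [List.length_cons]
    push_cast
    ring
  | case2 n h =>
    intro c
    rw [aCount, bDigits]
    simp [h]

theorem aLoop_eq (num : Int) : ∀ f s i : Int,
    aLoop num f s i =
      if PySem.Int.mod i 2 == 0 then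
        (f + (everyOther (bDigits num).tail).sum, s + (everyOther (bDigits num)).sum)
      else
        (f + (everyOther (bDigits num)).sum, s + (everyOther (bDigits num).tail).sum) := by
  induction num using bDigits.induct with
  | case1 n h ih =>
    intro f s i
    rw [aLoop, bDigits]
    have hm : PySem.Int.mod i 2 = i % 2 := PySem.Int.mod_eq_emod_of_pos (by omega)
    have hm1 : PySem.Int.mod (i + 1) 2 = (i + 1) % 2 := PySem.Int.mod_eq_emod_of_pos (by omega)
    simp only [h, dif_pos, everyOther_cons, List.tail_cons, ih, hm, hm1]
    by_cases hp : i % 2 = 0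
    · have hp1 : (i + 1) % 2 ≠ 0 := by omega
      simp [hp, hp1, List.sum_cons]
      omega
    · have hp1 : (i + 1) % 2 = 0 := by omega
      simp [hp, hp1, List.sum_cons]
      omega
  | case2 n h =>
    intro f s i
    rw [aLoop, bDigits]
    simp [h, everyOther]

theorem divisibleOnce_eq_alt (num : Int) : divisibleOnce num = divisibleOnce_alt num := by
  rw [divisibleOnce, divisibleOnce_alt, digitsArePair, aCount_eq, aLoop_eq]
  simp only [show PySem.Int.mod (1 : Int) 2 = 1 from by decide,
    show ((1 : Int) == 0) = false from by decide, Bool.false_eq_true, if_false,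
    PySem.List.len_eq, zero_add]
  by_cases hc : (PySem.Int.mod ((bDigits num).length : Int) 2 == 0) = true
  · simp only [hc, if_true]
    cases hb : ((everyOther (bDigits num)).sum == (everyOther (bDigits num).tail).sum) <;>
      simp [hb]
  · simp only [hc, Bool.false_eq_true, if_false]

-- ===== VERDICT (by name: the statement is the Claim_ definition above) =====
theorem divisibleOnce_spec : Claim_equal_divisibleOnce := by
  intro num _
  unfold Spec_divisibleOnce
  exact divisibleOnce_eq_alt num
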